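-- pv_equiv track=rewrite | github.com/4Freye/bike-stations | bike_functions.py | filter_subpaths
-- ===== SOURCE A (Python) =====
-- def is_subpath(path, longer_path):
--     # Check if path is a subpath of longer_path
--     if len(path) > len(longer_path):
--         return False
--     for i in range(len(longer_path) - len(path) + 1):
--         if longer_path[i:i+len(path)] == path:
--             return True
--     return False
--
-- def filter_subpaths(paths):
--     # Initialize a set to store subpaths
--     subpaths = set()
--     # Sort the paths by length, descending
--     sorted_paths = sorted(paths, key=len, reverse=True)
--     # Loop through each path
--     for path in sorted_paths:
--         # If the path is already marked as a subpath, skip it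
--         if tuple(path) in subpaths:
--             continue
--         # Check if the path is a subpath of any longer paths
--         for longer_path in sorted_paths:
--             if path == longer_path:
--                 continue
--             if is_subpath(path, longer_path):
--                 subpaths.add(tuple(path))
--                 break
--     # Return only the paths that are not subpaths
--     return [list(path) for path in sorted_paths if tuple(path) not in subpaths]
-- ===== SOURCE B (Python) =====
-- def filter_subpaths(paths):
--     # One pass: collect into a set every contiguous window of every path whose
--     # length is the length of some strictly shorter path actually present, then
--     # keep the paths (sorted by length, descending) not in that set.
--     lens = sorted({len(p) for p in paths})
--     windows = set()
--     for q in paths: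
--         n = len(q)
--         tq = tuple(q)
--         for L in lens:
--             if L >= n:
--                 break
--             for i in range(n - L + 1):
--                 windows.add(tq[i:i + L])
--     ordered = sorted(paths, key=len, reverse=True)
--     return [list(p) for p in ordered if tuple(p) not in windows]
-- ===== Notes on version B (the rewrite author's own statement) =====
-- stated objective: faster
-- what changed: A compares every path against every other path with a sliding-window is_subpath scan; B makes one pass that inserts into a hash set every contiguous window of every path at the lengths of strictly shorter paths actually present, then filters the length-sorted paths by one set lookup each, removing the per-path scan over all other paths.
import Mathlib
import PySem

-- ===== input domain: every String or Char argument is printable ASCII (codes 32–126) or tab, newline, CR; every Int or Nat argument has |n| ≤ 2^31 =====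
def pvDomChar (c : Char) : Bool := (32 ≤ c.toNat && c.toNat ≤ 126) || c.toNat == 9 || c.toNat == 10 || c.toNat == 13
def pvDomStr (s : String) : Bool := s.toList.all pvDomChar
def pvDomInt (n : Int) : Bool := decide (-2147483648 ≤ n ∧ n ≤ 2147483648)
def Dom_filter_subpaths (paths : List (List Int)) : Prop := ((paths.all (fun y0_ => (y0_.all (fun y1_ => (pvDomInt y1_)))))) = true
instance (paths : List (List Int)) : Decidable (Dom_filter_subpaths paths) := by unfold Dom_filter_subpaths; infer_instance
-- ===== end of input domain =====

-- B replaces A's pairwise is_subpath scans by one pass that collects, into a set, every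
-- contiguous window of every path at the lengths of strictly shorter paths present, and
-- filters the length-sorted paths by set lookup (alternative algorithm).

-- ===== PORT A =====
def is_subpath (path longer_path : List Int) : Bool :=
  if path.length > longer_path.length then false
  else (PySem.List.pyRange 0 ((longer_path.length : Int) - (path.length : Int) + 1) 1).any
    (fun i => PySem.List.slice longer_path (some i) (some (i + (path.length : Int))) == path)

-- inner 'for longer_path in sorted_paths: … break' loop of A
def fsInner (path : List Int) (qs : List (List Int)) (s : PySem.Set (List Int)) :
    PySem.Set (List Int) :=
  match qs with
  | [] => s
  | q :: rest =>
    if path == q then fsInner path rest s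
    else if is_subpath path q then PySem.Set.add s path
    else fsInner path rest s

def filter_subpaths (paths : List (List Int)) : List (List Int) :=
  let sorted_paths := PySem.List.sorted paths (fun p => p.length) true
  let subpaths := sorted_paths.foldl
    (fun s path => if PySem.Set.contains s path then s else fsInner path sorted_paths s)
    PySem.Set.empty
  sorted_paths.filter (fun path => ! PySem.Set.contains subpaths path)

-- ===== PORT B =====
-- 'for L in lens: if L >= n: break; for i in range(n - L + 1): windows.add(tq[i:i+L])'
def bWindows (q : List Int) (lens : List Nat) (w : PySem.Set (List Int)) :
    PySem.Set (List Int) :=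
  match lens with
  | [] => w
  | L :: rest =>
    if q.length ≤ L then w
    else bWindows q rest
      ((PySem.List.pyRange 0 ((q.length : Int) - (L : Int) + 1) 1).foldl
        (fun w i => PySem.Set.add w (PySem.List.slice q (some i) (some (i + (L : Int))))) w)

def filter_subpaths_alt (paths : List (List Int)) : List (List Int) :=
  let lens := PySem.List.sorted (PySem.Set.ofList (paths.map (fun p => p.length)))
    (fun x => x) false
  let windows := paths.foldl (fun w q => bWindows q lens w) PySem.Set.empty
  let ordered := PySem.List.sorted paths (fun p => p.length) true
  ordered.filter (fun p => ! PySem.Set.contains windows p)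

-- ===== PRECONDITION & SPEC =====
def Spec_filter_subpaths (paths : List (List Int)) (out : List (List Int)) : Prop := out = filter_subpaths_alt paths
instance (paths : List (List Int)) (out : List (List Int)) : Decidable (Spec_filter_subpaths paths out) := by unfold Spec_filter_subpaths; infer_instance

-- ===== CLAIM (what is proved, stated in full; the proofs are below) =====
def Claim_equal_filter_subpaths : Prop := ∀ (paths : List (List Int)), Dom_filter_subpaths paths → Spec_filter_subpaths paths (filter_subpaths paths)

-- ===== LEMMAS AND PROOFS =====

-- a contiguous window of q is an infix of q
theorem take_drop_isInfix (q : List Int) (a ℓ : Nat) : (q.drop a).take ℓ <:+: q :=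
  ((q.drop a).take_prefix ℓ).isInfix.trans (q.drop_suffix a).isInfix

-- every infix is a window
theorem isInfix_window (x q : List Int) (h : x <:+: q) :
    ∃ a, a + x.length ≤ q.length ∧ (q.drop a).take x.length = x := by
  obtain ⟨m, n, rfl⟩ := h
  refine ⟨m.length, by simp, ?_⟩
  rw [List.append_assoc, List.drop_left' rfl, List.take_left' rfl]

theorem slice_window (q : List Int) (i L : Int) (h0 : 0 ≤ i) (hL : 0 ≤ L) :
    PySem.List.slice q (some i) (some (i + L)) = (q.drop i.toNat).take L.toNat := by
  rw [PySem.List.slice_toNat _ h0 (by omega)]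
  congr 1
  omega

theorem is_subpath_iff (p q : List Int) : is_subpath p q = true ↔ p <:+: q := by
  unfold is_subpath
  split
  · rename_i h
    simp only [Bool.false_eq_true, false_iff]
    intro hinf
    exact absurd hinf.length_le (by omega)
  · rename_i h
    simp only [List.any_eq_true, PySem.List.mem_pyRange_one, beq_iff_eq]
    constructor
    · rintro ⟨i, ⟨h0, h1⟩, hs⟩
      rw [slice_window q i _ h0 (by positivity)] at hs
      rw [← hs]
      simpa using take_drop_isInfix q i.toNat p.length
    · intro hinf
      obtain ⟨a, ha, hw⟩ := isInfix_window p q hinf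
      refine ⟨(a : Int), ⟨by positivity, by omega⟩, ?_⟩
      rw [slice_window q a p.length (by positivity) (by positivity)]
      simpa using hw

-- generic membership in a fold that only grows a set
theorem mem_foldl_set {β : Type} (g : PySem.Set (List Int) → β → PySem.Set (List Int))
    (P : β → List Int → Prop)
    (hg : ∀ w b x, x ∈ g w b ↔ x ∈ w ∨ P b x) :
    ∀ (l : List β) (w0 : PySem.Set (List Int)) (x : List Int),
      x ∈ l.foldl g w0 ↔ x ∈ w0 ∨ ∃ b ∈ l, P b x := by
  intro l
  induction l with
  | nil => simp
  | cons b l ih =>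
    intro w0 x
    simp only [List.foldl_cons, ih, hg, List.mem_cons]
    constructor
    · rintro ((h | h) | ⟨c, hc, hp⟩)
      · exact Or.inl h
      · exact Or.inr ⟨b, Or.inl rfl, h⟩
      · exact Or.inr ⟨c, Or.inr hc, hp⟩
    · rintro (h | ⟨c, (rfl | hc), hp⟩)
      · exact Or.inl (Or.inl h)
      · exact Or.inl (Or.inr hp)
      · exact Or.inr ⟨c, hc, hp⟩

-- membership in B's break-guarded window loop for one path q (lens ascending)
theorem mem_bWindows (q : List Int) (lens : List Nat) (hs : lens.Pairwise (· ≤ ·)) :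
    ∀ (w : PySem.Set (List Int)) (x : List Int),
      x ∈ bWindows q lens w ↔ x ∈ w ∨ ∃ L ∈ lens, L < q.length ∧
        ∃ i ∈ PySem.List.pyRange 0 ((q.length : Int) - (L : Int) + 1) 1,
          x = PySem.List.slice q (some i) (some (i + (L : Int))) := by
  induction lens with
  | nil => simp [bWindows]
  | cons L rest ih =>
    intro w x
    rcases List.pairwise_cons.mp hs with ⟨hL, hrest⟩
    by_cases hq : q.length ≤ L
    · rw [show bWindows q (L :: rest) w = w by simp [bWindows, hq]]
      simp only [List.mem_cons]
      constructor
      · exact Or.inl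
      · rintro (h | ⟨L', (rfl | hL'), hlt, _⟩)
        · exact h
        · omega
        · exact absurd hlt (by have := hL L' hL'; omega)
    · rw [show bWindows q (L :: rest) w = bWindows q rest
          ((PySem.List.pyRange 0 ((q.length : Int) - (L : Int) + 1) 1).foldl
            (fun w i => PySem.Set.add w (PySem.List.slice q (some i) (some (i + (L : Int))))) w)
          by simp [bWindows, hq], ih hrest,
        mem_foldl_set _ (fun i x => x = PySem.List.slice q (some i) (some (i + (L : Int))))
          (fun w i x => PySem.Set.mem_add w _ x)]
      simp only [List.mem_cons]
      constructor
      · rintro ((h | ⟨i, hi, hx⟩) | ⟨L', hL', hlt, i, hi, hx⟩)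
        · exact Or.inl h
        · exact Or.inr ⟨L, Or.inl rfl, by omega, i, hi, hx⟩
        · exact Or.inr ⟨L', Or.inr hL', hlt, i, hi, hx⟩
      · rintro (h | ⟨L', (rfl | hL'), hlt, i, hi, hx⟩)
        · exact Or.inl (Or.inl h)
        · exact Or.inl (Or.inr ⟨i, hi, hx⟩)
        · exact Or.inr ⟨L', hL', hlt, i, hi, hx⟩

-- for a path p of the input, membership in B's windows set is 'proper infix of some path'
theorem mem_windows (paths : List (List Int)) (p : List Int) (hp : p ∈ paths) :
    p ∈ paths.foldl (fun w q => bWindows q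
        (PySem.List.sorted (PySem.Set.ofList (paths.map (fun p => p.length))) (fun x => x) false)
        w) PySem.Set.empty
    ↔ ∃ q ∈ paths, p.length < q.length ∧ p <:+: q := by
  have hs : (PySem.List.sorted (PySem.Set.ofList (paths.map (fun p => p.length)))
      (fun x => x) false).Pairwise (· ≤ ·) :=
    PySem.List.sorted_pairwise _ _
  rw [mem_foldl_set _ _ (fun w q x => mem_bWindows q _ hs w x)]
  simp only [PySem.Set.empty_eq, List.not_mem_nil, false_or]
  constructor
  · rintro ⟨q, hq, L, _, hlt, i, hi, hx⟩
    rw [PySem.List.mem_pyRange_one] at hi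
    refine ⟨q, hq, ?_, ?_⟩
    · rw [hx, slice_window q i _ hi.1 (by positivity)]
      have := List.length_take_le ((L : Int)).toNat (q.drop i.toNat)
      have : ((L : Int)).toNat = L := by omega
      omega
    · rw [hx, slice_window q i _ hi.1 (by positivity)]
      exact take_drop_isInfix q i.toNat _
  · rintro ⟨q, hq, hlt, hinf⟩
    obtain ⟨a, ha, hw⟩ := isInfix_window p q hinf
    refine ⟨q, hq, p.length, ?_, hlt, (a : Int), ?_, ?_⟩
    · rw [PySem.List.mem_sorted, PySem.Set.mem_ofList]
      exact List.mem_map.mpr ⟨p, hp, rfl⟩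
    · rw [PySem.List.mem_pyRange_one]; omega
    · rw [slice_window q a p.length (by positivity) (by positivity)]
      simpa using hw.symm

-- A's inner loop adds path exactly when some distinct q in qs contains it
theorem mem_fsInner (p : List Int) (qs : List (List Int)) (s : PySem.Set (List Int))
    (x : List Int) :
    x ∈ fsInner p qs s ↔ x ∈ s ∨ (x = p ∧ ∃ q ∈ qs, p ≠ q ∧ is_subpath p q = true) := by
  induction qs with
  | nil => simp [fsInner]
  | cons q rest ih =>
    by_cases hpq : p = q
    · subst hpq
      rw [show fsInner p (p :: rest) s = fsInner p rest s by simp [fsInner], ih]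
      simp only [List.mem_cons]
      constructor
      · rintro (h | ⟨rfl, c, hc, hne, hs⟩)
        · exact Or.inl h
        · exact Or.inr ⟨rfl, c, Or.inr hc, hne, hs⟩
      · rintro (h | ⟨rfl, c, (rfl | hc), hne, hs⟩)
        · exact Or.inl h
        · exact absurd rfl hne
        · exact Or.inr ⟨rfl, c, hc, hne, hs⟩
    · by_cases hsub : is_subpath p q = true
      · rw [show fsInner p (q :: rest) s = PySem.Set.add s p by
          simp [fsInner, hpq, hsub], PySem.Set.mem_add]
        simp only [List.mem_cons]
        constructor
        · rintro (h | rfl)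
          · exact Or.inl h
          · exact Or.inr ⟨rfl, q, Or.inl rfl, hpq, hsub⟩
        · rintro (h | ⟨rfl, _⟩)
          · exact Or.inl h
          · exact Or.inr rfl
      · rw [show fsInner p (q :: rest) s = fsInner p rest s by simp [fsInner, hpq, hsub], ih]
        simp only [List.mem_cons]
        constructor
        · rintro (h | ⟨rfl, c, hc, hne, hs⟩)
          · exact Or.inl h
          · exact Or.inr ⟨rfl, c, Or.inr hc, hne, hs⟩
        · rintro (h | ⟨rfl, c, (rfl | hc), hne, hs⟩)
          · exact Or.inl h
          · exact absurd hs hsub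
          · exact Or.inr ⟨rfl, c, hc, hne, hs⟩

-- A's outer loop: membership in the accumulated set
theorem mem_outer (L : List (List Int)) :
    ∀ (ts : List (List Int)) (s : PySem.Set (List Int)) (x : List Int),
      x ∈ ts.foldl (fun s p => if PySem.Set.contains s p then s else fsInner p L s) s ↔
        x ∈ s ∨ (x ∈ ts ∧ ∃ q ∈ L, x ≠ q ∧ is_subpath x q = true) := by
  intro ts
  induction ts with
  | nil => simp
  | cons p ts ih =>
    intro s x
    simp only [List.foldl_cons]
    by_cases hc : PySem.Set.contains s p = true
    · have hps : p ∈ s := (PySem.Set.contains_iff s p).mp hc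
      simp only [hc, if_true, ih, List.mem_cons]
      constructor
      · rintro (h | ⟨hx, hq⟩)
        · exact Or.inl h
        · exact Or.inr ⟨Or.inr hx, hq⟩
      · rintro (h | ⟨(rfl | hx), hq⟩)
        · exact Or.inl h
        · exact Or.inl hps
        · exact Or.inr ⟨hx, hq⟩
    · rw [if_neg hc, ih, mem_fsInner]
      simp only [List.mem_cons]
      constructor
      · rintro ((h | ⟨rfl, hq⟩) | ⟨hx, hq⟩)
        · exact Or.inl h
        · exact Or.inr ⟨Or.inl rfl, hq⟩
        · exact Or.inr ⟨Or.inr hx, hq⟩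
      · rintro (h | ⟨(rfl | hx), hq⟩)
        · exact Or.inl (Or.inl h)
        · exact Or.inl (Or.inr ⟨rfl, hq⟩)
        · exact Or.inr ⟨hx, hq⟩

-- 'distinct and contained' is the same as 'strictly shorter and contained'
theorem ne_infix_iff (x q : List Int) :
    (x ≠ q ∧ is_subpath x q = true) ↔ (x.length < q.length ∧ x <:+: q) := by
  rw [is_subpath_iff]
  constructor
  · rintro ⟨hne, hinf⟩
    refine ⟨lt_of_le_of_ne hinf.length_le ?_, hinf⟩
    intro hlen
    exact hne (hinf.eq_of_length hlen)
  · rintro ⟨hlt, hinf⟩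
    exact ⟨fun h => by simp [h] at hlt, hinf⟩

-- ===== VERDICT (by name: the statement is the Claim_ definition above) =====
theorem filter_subpaths_spec : Claim_equal_filter_subpaths := by
  intro paths _
  unfold Spec_filter_subpaths filter_subpaths filter_subpaths_alt
  simp only []
  apply List.filter_congr
  intro p hp
  have hpL : p ∈ paths := (PySem.List.mem_sorted _ _ _ _).mp hp
  congr 1
  rw [Bool.eq_iff_iff, PySem.Set.contains_iff, PySem.Set.contains_iff,
      mem_outer _ _ _ p, mem_windows paths p hpL]
  simp only [PySem.Set.empty_eq, List.not_mem_nil, false_or]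
  constructor
  · rintro ⟨_, q, hq, hd⟩
    exact ⟨q, (PySem.List.mem_sorted _ _ _ _).mp hq, (ne_infix_iff p q).mp hd⟩
  · rintro ⟨q, hq, hd⟩
    exact ⟨hp, q, (PySem.List.mem_sorted _ _ _ _).mpr hq, (ne_infix_iff p q).mpr hd⟩
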